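/- GENERATED by mk_final_copies.py from the proof of the farm's unit `ilog` (farm:ilog.1: Proof.lean) as the
   re-elaboration sweep compiled it — do not edit. -/
import Asan.CheckWalk
import Vorbis.Spec.Units.ilog

open X86 X86.User Asan Vorbis

set_option maxRecDepth 4000
set_option maxHeartbeats 4000000

namespace Vorbis.Spec.ilog

/-- The table index as a number: for a 32-bit index below 16, `rbx + 0x120640` (rbx the sign-extended index) is the
address `0x120640 + index`, without wrap. -/
theorem idx_toNat (y : BitVec 32) (hy : y.toNat < 16) :
    (Word.ofBV (BitVec.signExtend 64 y) + 1181248).toNat = 1181248 + y.toNat := by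
  have hmsb : y.msb = false := by
    rw [BitVec.msb_eq_decide]
    simp only [decide_eq_false_iff_not]
    omega
  have e : BitVec.signExtend 64 y = BitVec.setWidth 64 y := BitVec.signExtend_eq_setWidth_of_msb_false hmsb
  have h1 : (Word.ofBV (BitVec.signExtend 64 y)).toNat = y.toNat := by
    rw [e]
    unfold Word.ofBV
    simp only [UInt64.toNat_ofBitVec, BitVec.toNat_setWidth]
    omega
  rw [UInt64.toNat_add, h1]
  have e2 : (1181248 : UInt64).toNat = 1181248 := rfl
  rw [e2]
  omega

/-- `sar` of a non-negative 32-bit number is the division by the power of two. -/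
theorem sar_toNat (x : BitVec 32) (c : Nat) (h : x.msb = false) : (x.sshiftRight c).toNat = x.toNat / 2 ^ c := by
  rw [BitVec.sshiftRight_eq_of_msb_false h, BitVec.toNat_ushiftRight, Nat.shiftRight_eq_div_pow]

/-- A non-negative 32-bit number (`test edi, edi ; js` not taken): its signed value is its unsigned value, below `2 ^ 31`. -/
theorem toInt_of_msb (x : BitVec 32) (h : x.msb = false) : x.toInt = (x.toNat : Int) ∧ x.toNat < 2 ^ 31 := by
  refine ⟨BitVec.toInt_eq_toNat_of_msb h, ?_⟩
  rw [BitVec.msb_eq_decide] at h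
  simp only [decide_eq_false_iff_not] at h
  omega

/-- A negative 32-bit number (`test edi, edi ; js` taken): its signed value is below 0. -/
theorem toInt_neg_of_msb (x : BitVec 32) (h : x.msb = true) : x.toInt < 0 := by
  rw [BitVec.toInt_neg_iff]
  rw [BitVec.msb_eq_decide] at h
  simp only [decide_eq_true_eq] at h
  omega

/-- The signed value of a 32-bit constant below `2 ^ 31`. -/
theorem toInt_const (k : Nat) (hk : k < 2 ^ 31) : (BitVec.ofNat 32 k).toInt = (k : Int) := by
  have hkn : (BitVec.ofNat 32 k).toNat = k := by
    rw [BitVec.toNat_ofNat]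
    omega
  have hkm : (BitVec.ofNat 32 k).msb = false := by
    rw [BitVec.msb_eq_decide, hkn]
    simp only [decide_eq_false_iff_not]
    omega
  rw [(toInt_of_msb _ hkm).1, hkn]

/-- The signed comparison `cmp edi, k ; jg` of a non-negative `edi` with a non-negative constant, as numbers. -/
theorem jg_iff (k : Nat) (x : BitVec 32) (hmsb : x.msb = false) (hk : k < 2 ^ 31) :
    (BitVec.ofNat 32 k).toInt < x.toInt ↔ k < x.toNat := by
  rw [(toInt_of_msb x hmsb).1, toInt_const k hk]
  omega

/-- The signed comparison `cmp edi, k ; jle` of a non-negative `edi` with a non-negative constant, as numbers. -/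
theorem jle_iff (k : Nat) (x : BitVec 32) (hmsb : x.msb = false) (hk : k < 2 ^ 31) :
    x.toInt ≤ (BitVec.ofNat 32 k).toInt ↔ x.toNat ≤ k := by
  rw [(toInt_of_msb x hmsb).1, toInt_const k hk]
  omega

/-- `movsx eax, BYTE PTR […]` of a table entry (at most 4): the entry itself. -/
theorem movsx_small (t : Nat) (ht : t ≤ 4) : (BitVec.signExtend 32 (BitVec.ofNat 8 t)).toNat = t := by
  have hmsb : (BitVec.ofNat 8 t).msb = false := by
    rw [BitVec.msb_eq_decide]
    simp only [decide_eq_false_iff_not, BitVec.toNat_ofNat]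
    omega
  rw [BitVec.signExtend_eq_setWidth_of_msb_false hmsb]
  simp only [BitVec.toNat_setWidth, BitVec.toNat_ofNat]
  omega

/-- The result of the first range: rax after `movsx eax, BYTE PTR [rbx+0x120640]`. -/
theorem rax_val0 (t : Nat) (ht : t ≤ 4) : (Word.ofBV (BitVec.signExtend 32 (BitVec.ofNat 8 t))).toNat = t := by
  rw [Vorbis.toNat_ofBV32, movsx_small t ht]

/-- The result of the other ranges: rax after `movsx eax, BYTE PTR [rbx+0x120640] ; add eax, c`. -/
theorem rax_val (t c : Nat) (ht : t ≤ 4) (hc : c ≤ 30) :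
    (Word.ofBV (BitVec.signExtend 32 (BitVec.ofNat 8 t) + BitVec.ofNat 32 c)).toNat = c + t := by
  rw [Vorbis.toNat_ofBV32, BitVec.toNat_add, movsx_small t ht, BitVec.toNat_ofNat]
  omega

/-- With the table's contents in memory (SH7), the byte at `0x120640 + i` is `log2_4[i]`. -/
theorem table_read (mem : Mem) (b : Word) (i : Nat) (hb : b.toNat = 1181248 + i) (hi : i < 16) (hT : Log2_4In mem) :
    mem.readLE b 1 = log2_4Table.getD i 0 := by
  have e : b = UInt64.ofNat (Vorbis.Globals.log2_4.beg + i) := by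
    have eb : Vorbis.Globals.log2_4.beg = 1181248 := rfl
    rw [eb, ← hb, UInt64.ofNat_toNat]
  rw [e]
  exact hT i hi

/-- A byte at `0x120640 + i`, `i < 16`, lies inside the live object `log2_4` (SH5): the two facts `Vorbis.check_small_other` asks. -/
theorem in_table (b : Word) (i : Nat) (hb : b.toNat = 1181248 + i) (hi : i < 16) :
    Vorbis.Globals.log2_4.obj.base ≤ b.toNat ∧
    b.toNat + 1 ≤ Vorbis.Globals.log2_4.obj.base + Vorbis.Globals.log2_4.obj.size := by
  have eb : Vorbis.Globals.log2_4.obj.base = 1181248 := rfl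
  have es : Vorbis.Globals.log2_4.obj.size = 16 := rfl
  rw [eb, es, hb]
  omega

/-- The address `rbx + 0x120640` of a shifted range, `rbx = sext(n >> c)`, for `n ≥ 0` and `n >> c < 16`. -/
theorem addr_range (x : BitVec 32) (c : Nat) (hmsb : x.msb = false) (hlt : x.toNat / 2 ^ c < 16) :
    (Word.ofBV (BitVec.signExtend 64 (x.sshiftRight c)) + 1181248).toNat = 1181248 + x.toNat / 2 ^ c := by
  have hs := sar_toNat x c hmsb
  rw [idx_toNat _ (by omega), hs]

/-- The value `ilogVal` in the range of the shift 0 (stb_vorbis_fixed.c 1062). -/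
theorem ilogVal_range0 (n : Nat) (h2 : n < 2 ^ 4) : ilogVal (n : Int) = log2_4Table.getD n 0 := by
  unfold ilogVal
  rw [if_neg (by omega), if_pos (by omega), Int.toNat_natCast]

/-- The value `ilogVal` in the range of the shift 5 (stb_vorbis_fixed.c 1063). -/
theorem ilogVal_range5 (n : Nat) (h1 : 2 ^ 4 ≤ n) (h2 : n < 2 ^ 9) : ilogVal (n : Int) = 5 + log2_4Table.getD (n / 2 ^ 5) 0 := by
  unfold ilogVal
  rw [if_neg (by omega), if_neg (by omega), if_pos (by omega), Int.toNat_natCast]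

/-- The value `ilogVal` in the range of the shift 10 (stb_vorbis_fixed.c 1064). -/
theorem ilogVal_range10 (n : Nat) (h1 : 2 ^ 9 ≤ n) (h2 : n < 2 ^ 14) : ilogVal (n : Int) = 10 + log2_4Table.getD (n / 2 ^ 10) 0 := by
  unfold ilogVal
  rw [if_neg (by omega), if_neg (by omega), if_neg (by omega), if_pos (by omega), Int.toNat_natCast]

/-- The value `ilogVal` in the range of the shift 15 (stb_vorbis_fixed.c 1065). -/
theorem ilogVal_range15 (n : Nat) (h1 : 2 ^ 14 ≤ n) (h2 : n < 2 ^ 19) : ilogVal (n : Int) = 15 + log2_4Table.getD (n / 2 ^ 15) 0 := by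
  unfold ilogVal
  rw [if_neg (by omega), if_neg (by omega), if_neg (by omega), if_neg (by omega), if_pos (by omega), Int.toNat_natCast]

/-- The value `ilogVal` in the range of the shift 20 (stb_vorbis_fixed.c 1066). -/
theorem ilogVal_range20 (n : Nat) (h1 : 2 ^ 19 ≤ n) (h2 : n < 2 ^ 24) : ilogVal (n : Int) = 20 + log2_4Table.getD (n / 2 ^ 20) 0 := by
  unfold ilogVal
  rw [if_neg (by omega), if_neg (by omega), if_neg (by omega), if_neg (by omega), if_neg (by omega), if_pos (by omega), Int.toNat_natCast]

/-- The value `ilogVal` in the range of the shift 25 (stb_vorbis_fixed.c 1067). -/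
theorem ilogVal_range25 (n : Nat) (h1 : 2 ^ 24 ≤ n) (h2 : n < 2 ^ 29) : ilogVal (n : Int) = 25 + log2_4Table.getD (n / 2 ^ 25) 0 := by
  unfold ilogVal
  rw [if_neg (by omega), if_neg (by omega), if_neg (by omega), if_neg (by omega), if_neg (by omega), if_neg (by omega), if_pos (by omega), Int.toNat_natCast]

/-- The value `ilogVal` in the range of the shift 30 (stb_vorbis_fixed.c 1068). -/
theorem ilogVal_range30 (n : Nat) (h1 : 2 ^ 29 ≤ n) : ilogVal (n : Int) = 30 + log2_4Table.getD (n / 2 ^ 30) 0 := by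
  unfold ilogVal
  rw [if_neg (by omega), if_neg (by omega), if_neg (by omega), if_neg (by omega), if_neg (by omega), if_neg (by omega), if_neg (by omega), Int.toNat_natCast]

/-- The two stack stores of `ilog` (the pushed rbx, the return address of the check call) do not change a byte of the
table: the stack is at `0x700000` and above, the table below `0x120650`. -/
theorem read_through (mem : Mem) (sp b : Word) (v1 v2 : Nat) (hsp : 7340032 + 32 ≤ sp.toNat) (hb : b.toNat < 1181264) :
    ((mem.writeLE (sp - 8) 8 v1).writeLE (sp - 16) 8 v2).readLE b 1 = mem.readLE b 1 := by
  have h0 : mem.readLE b 1 = mem.readLE b 1 := rfl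
  u_frame h0

end Vorbis.Spec.ilog

/-- `ilog(n)` satisfies its contract: `test edi, edi ; js` (a negative `n` returns 0 at once), `push rbx`, a tree of signed
compares with seven leaves, each one check call and one byte load from the global `log2_4` at index `n >> c < 16`, joining at
`pop rbx ; ret`. ONE walk; the seven check goals are closed object-level (`log2_4` is a live object, SH5); the value of each
leaf is `ilogVal` when the table has its contents (SH7). -/
theorem Vorbis.Spec.Worked.ilog_ok : Vorbis.Spec.ilog.Statement := by
  intro Lay hLay μ hμ u₀ hcode hload1 others frames u ret he hpre
  v_entry he
  obtain ⟨hsh, hobj⟩ := hpre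
  have hsp := hsh.rsp
  u_walk hcode [hμ.vendor] span [Vorbis.L.textLo, Vorbis.L.textHi] side (v_side)
  case check_1041f4 =>
    -- 0x1041f4, C line 1069: the check of `log2_4[n >> 30]`, n ≥ 2^29: the index is below 16
    have hun : ShadowUntouched u.mem s_1041f4.mem := by v_untouched
    obtain ⟨hx, hx31⟩ := Vorbis.Spec.ilog.toInt_of_msb _ hbr_104102
    rw [Vorbis.Spec.ilog.jg_iff _ _ hbr_104102 (by decide)] at hbr_1041c4
    have hb := Vorbis.Spec.ilog.addr_range _ 30 hbr_104102 (by omega)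
    have hin := Vorbis.Spec.ilog.in_table _ _ hb (by omega)
    exact Vorbis.check_small_other hsh.inv hun hobj (by decide) hin.1 hin.2
  case check_1041d3 =>
    -- 0x1041d3, C line 1068: the check of `log2_4[n >> 25]`, 2^24 ≤ n < 2^29: the index is below 16
    have hun : ShadowUntouched u.mem s_1041d3.mem := by v_untouched
    obtain ⟨hx, hx31⟩ := Vorbis.Spec.ilog.toInt_of_msb _ hbr_104102
    rw [Vorbis.Spec.ilog.jg_iff _ _ hbr_104102 (by decide)] at hbr_104178
    rw [Vorbis.Spec.ilog.jg_iff _ _ hbr_104102 (by decide)] at hbr_1041c4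
    have hb := Vorbis.Spec.ilog.addr_range _ 25 hbr_104102 (by omega)
    have hin := Vorbis.Spec.ilog.in_table _ _ hb (by omega)
    exact Vorbis.check_small_other hsh.inv hun hobj (by decide) hin.1 hin.2
  case check_1041ad =>
    -- 0x1041ad, C line 1067: the check of `log2_4[n >> 20]`, 2^19 ≤ n < 2^24: the index is below 16
    have hun : ShadowUntouched u.mem s_1041ad.mem := by v_untouched
    obtain ⟨hx, hx31⟩ := Vorbis.Spec.ilog.toInt_of_msb _ hbr_104102
    rw [Vorbis.Spec.ilog.jg_iff _ _ hbr_104102 (by decide)] at hbr_104178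
    rw [Vorbis.Spec.ilog.jg_iff _ _ hbr_104102 (by decide)] at hbr_104180
    have hb := Vorbis.Spec.ilog.addr_range _ 20 hbr_104102 (by omega)
    have hin := Vorbis.Spec.ilog.in_table _ _ hb (by omega)
    exact Vorbis.check_small_other hsh.inv hun hobj (by decide) hin.1 hin.2
  case check_10418f =>
    -- 0x10418f, C line 1066: the check of `log2_4[n >> 15]`, 2^14 ≤ n < 2^19: the index is below 16
    have hun : ShadowUntouched u.mem s_10418f.mem := by v_untouched
    obtain ⟨hx, hx31⟩ := Vorbis.Spec.ilog.toInt_of_msb _ hbr_104102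
    rw [Vorbis.Spec.ilog.jg_iff _ _ hbr_104102 (by decide)] at hbr_10410f
    rw [Vorbis.Spec.ilog.jg_iff _ _ hbr_104102 (by decide)] at hbr_104180
    have hb := Vorbis.Spec.ilog.addr_range _ 15 hbr_104102 (by omega)
    have hin := Vorbis.Spec.ilog.in_table _ _ hb (by omega)
    exact Vorbis.check_small_other hsh.inv hun hobj (by decide) hin.1 hin.2
  case check_104146 =>
    -- 0x104146, C line 1062: the check of `log2_4[n >> 0]`, 0 ≤ n < 16: the index is below 16
    have hun : ShadowUntouched u.mem s_104146.mem := by v_untouched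
    obtain ⟨hx, hx31⟩ := Vorbis.Spec.ilog.toInt_of_msb _ hbr_104102
    rw [Vorbis.Spec.ilog.jle_iff _ _ hbr_104102 (by decide)] at hbr_104114
    have hb := Vorbis.Spec.ilog.idx_toNat _ (show (Word.part .w32 (u.reg .rdi)).toNat < 16 by omega)
    have hin := Vorbis.Spec.ilog.in_table _ _ hb (by omega)
    exact Vorbis.check_small_other hsh.inv hun hobj (by decide) hin.1 hin.2
  case check_104161 =>
    -- 0x104161, C line 1064: the check of `log2_4[n >> 10]`, 512 ≤ n < 2^14: the index is below 16
    have hun : ShadowUntouched u.mem s_104161.mem := by v_untouched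
    obtain ⟨hx, hx31⟩ := Vorbis.Spec.ilog.toInt_of_msb _ hbr_104102
    rw [Vorbis.Spec.ilog.jg_iff _ _ hbr_104102 (by decide)] at hbr_10410f
    rw [Vorbis.Spec.ilog.jg_iff _ _ hbr_104102 (by decide)] at hbr_10411c
    have hb := Vorbis.Spec.ilog.addr_range _ 10 hbr_104102 (by omega)
    have hin := Vorbis.Spec.ilog.in_table _ _ hb (by omega)
    exact Vorbis.check_small_other hsh.inv hun hobj (by decide) hin.1 hin.2
  case check_10412b =>
    -- 0x10412b, C line 1063: the check of `log2_4[n >> 5]`, 16 ≤ n < 512: the index is below 16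
    have hun : ShadowUntouched u.mem s_10412b.mem := by v_untouched
    obtain ⟨hx, hx31⟩ := Vorbis.Spec.ilog.toInt_of_msb _ hbr_104102
    rw [Vorbis.Spec.ilog.jle_iff _ _ hbr_104102 (by decide)] at hbr_104114
    rw [Vorbis.Spec.ilog.jg_iff _ _ hbr_104102 (by decide)] at hbr_10411c
    have hb := Vorbis.Spec.ilog.addr_range _ 5 hbr_104102 (by omega)
    have hin := Vorbis.Spec.ilog.in_table _ _ hb (by omega)
    exact Vorbis.check_small_other hsh.inv hun hobj (by decide) hin.1 hin.2
  · -- 0x10420d, C line 1058: n < 0, `return 0` before any push or memory access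
    refine ReachVia.done ?_
    v_returned
    have hneg := Vorbis.Spec.ilog.toInt_neg_of_msb _ hbr_104102
    refine ⟨by v_untouched, ?_, ?_⟩
    · intro _
      exact w_rax
    · intro _
      rw [w_rax, Vorbis.Spec.ilogVal_neg _ hneg]
      rfl
  · -- 0x104153 `pop rbx ; ret` from 0x104203, C line 1069: n ≥ 2^29, the result is 30 + log2_4[n >> 30]
    refine ReachVia.done ?_
    v_returned
    obtain ⟨hx, hx31⟩ := Vorbis.Spec.ilog.toInt_of_msb _ hbr_104102
    rw [Vorbis.Spec.ilog.jg_iff _ _ hbr_104102 (by decide)] at hbr_1041c4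
    have hb := Vorbis.Spec.ilog.addr_range _ 30 hbr_104102 (by omega)
    refine ⟨by v_untouched, ?_, ?_⟩
    · -- n is not negative here
      intro hneg
      exfalso
      omega
    · -- the value, when the table has its contents
      intro hT
      have hrd := Vorbis.Spec.ilog.table_read u.mem _ _ hb (by omega) hT
      rw [w_rax, hx, Vorbis.Spec.ilog.ilogVal_range30 _ (by omega)]
      rw [Vorbis.Spec.ilog.read_through _ _ _ _ _ he_room (by omega), hrd]
      exact Vorbis.Spec.ilog.rax_val _ 30 (Vorbis.Spec.log2_4Table_le _) (by decide)
  · -- 0x104153 `pop rbx ; ret` from 0x1041e2, C line 1068: 2^24 ≤ n < 2^29, the result is 25 + log2_4[n >> 25]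
    refine ReachVia.done ?_
    v_returned
    obtain ⟨hx, hx31⟩ := Vorbis.Spec.ilog.toInt_of_msb _ hbr_104102
    rw [Vorbis.Spec.ilog.jg_iff _ _ hbr_104102 (by decide)] at hbr_104178
    rw [Vorbis.Spec.ilog.jg_iff _ _ hbr_104102 (by decide)] at hbr_1041c4
    have hb := Vorbis.Spec.ilog.addr_range _ 25 hbr_104102 (by omega)
    refine ⟨by v_untouched, ?_, ?_⟩
    · -- n is not negative here
      intro hneg
      exfalso
      omega
    · -- the value, when the table has its contents
      intro hT
      have hrd := Vorbis.Spec.ilog.table_read u.mem _ _ hb (by omega) hT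
      rw [w_rax, hx, Vorbis.Spec.ilog.ilogVal_range25 _ (by omega) (by omega)]
      rw [Vorbis.Spec.ilog.read_through _ _ _ _ _ he_room (by omega), hrd]
      exact Vorbis.Spec.ilog.rax_val _ 25 (Vorbis.Spec.log2_4Table_le _) (by decide)
  · -- 0x104153 `pop rbx ; ret` from 0x1041bc, C line 1067: 2^19 ≤ n < 2^24, the result is 20 + log2_4[n >> 20]
    refine ReachVia.done ?_
    v_returned
    obtain ⟨hx, hx31⟩ := Vorbis.Spec.ilog.toInt_of_msb _ hbr_104102
    rw [Vorbis.Spec.ilog.jg_iff _ _ hbr_104102 (by decide)] at hbr_104178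
    rw [Vorbis.Spec.ilog.jg_iff _ _ hbr_104102 (by decide)] at hbr_104180
    have hb := Vorbis.Spec.ilog.addr_range _ 20 hbr_104102 (by omega)
    refine ⟨by v_untouched, ?_, ?_⟩
    · -- n is not negative here
      intro hneg
      exfalso
      omega
    · -- the value, when the table has its contents
      intro hT
      have hrd := Vorbis.Spec.ilog.table_read u.mem _ _ hb (by omega) hT
      rw [w_rax, hx, Vorbis.Spec.ilog.ilogVal_range20 _ (by omega) (by omega)]
      rw [Vorbis.Spec.ilog.read_through _ _ _ _ _ he_room (by omega), hrd]
      exact Vorbis.Spec.ilog.rax_val _ 20 (Vorbis.Spec.log2_4Table_le _) (by decide)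
  · -- 0x104153 `pop rbx ; ret` from 0x10419e, C line 1066: 2^14 ≤ n < 2^19, the result is 15 + log2_4[n >> 15]
    refine ReachVia.done ?_
    v_returned
    obtain ⟨hx, hx31⟩ := Vorbis.Spec.ilog.toInt_of_msb _ hbr_104102
    rw [Vorbis.Spec.ilog.jg_iff _ _ hbr_104102 (by decide)] at hbr_10410f
    rw [Vorbis.Spec.ilog.jg_iff _ _ hbr_104102 (by decide)] at hbr_104180
    have hb := Vorbis.Spec.ilog.addr_range _ 15 hbr_104102 (by omega)
    refine ⟨by v_untouched, ?_, ?_⟩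
    · -- n is not negative here
      intro hneg
      exfalso
      omega
    · -- the value, when the table has its contents
      intro hT
      have hrd := Vorbis.Spec.ilog.table_read u.mem _ _ hb (by omega) hT
      rw [w_rax, hx, Vorbis.Spec.ilog.ilogVal_range15 _ (by omega) (by omega)]
      rw [Vorbis.Spec.ilog.read_through _ _ _ _ _ he_room (by omega), hrd]
      exact Vorbis.Spec.ilog.rax_val _ 15 (Vorbis.Spec.log2_4Table_le _) (by decide)
  · -- 0x104153 `pop rbx ; ret` from 0x10414b, C line 1062: 0 ≤ n < 16, the result is 0 + log2_4[n >> 0]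
    refine ReachVia.done ?_
    v_returned
    obtain ⟨hx, hx31⟩ := Vorbis.Spec.ilog.toInt_of_msb _ hbr_104102
    rw [Vorbis.Spec.ilog.jle_iff _ _ hbr_104102 (by decide)] at hbr_104114
    have hb := Vorbis.Spec.ilog.idx_toNat _ (show (Word.part .w32 (u.reg .rdi)).toNat < 16 by omega)
    refine ⟨by v_untouched, ?_, ?_⟩
    · -- n is not negative here
      intro hneg
      exfalso
      omega
    · -- the value, when the table has its contents
      intro hT
      have hrd := Vorbis.Spec.ilog.table_read u.mem _ _ hb (by omega) hT
      rw [w_rax, hx, Vorbis.Spec.ilog.ilogVal_range0 _ (by omega)]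
      rw [Vorbis.Spec.ilog.read_through _ _ _ _ _ he_room (by omega), hrd]
      exact Vorbis.Spec.ilog.rax_val0 _ (Vorbis.Spec.log2_4Table_le _)
  · -- 0x104153 `pop rbx ; ret` from 0x104170, C line 1064: 512 ≤ n < 2^14, the result is 10 + log2_4[n >> 10]
    refine ReachVia.done ?_
    v_returned
    obtain ⟨hx, hx31⟩ := Vorbis.Spec.ilog.toInt_of_msb _ hbr_104102
    rw [Vorbis.Spec.ilog.jg_iff _ _ hbr_104102 (by decide)] at hbr_10410f
    rw [Vorbis.Spec.ilog.jg_iff _ _ hbr_104102 (by decide)] at hbr_10411c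
    have hb := Vorbis.Spec.ilog.addr_range _ 10 hbr_104102 (by omega)
    refine ⟨by v_untouched, ?_, ?_⟩
    · -- n is not negative here
      intro hneg
      exfalso
      omega
    · -- the value, when the table has its contents
      intro hT
      have hrd := Vorbis.Spec.ilog.table_read u.mem _ _ hb (by omega) hT
      rw [w_rax, hx, Vorbis.Spec.ilog.ilogVal_range10 _ (by omega) (by omega)]
      rw [Vorbis.Spec.ilog.read_through _ _ _ _ _ he_room (by omega), hrd]
      exact Vorbis.Spec.ilog.rax_val _ 10 (Vorbis.Spec.log2_4Table_le _) (by decide)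
  · -- 0x104153 `pop rbx ; ret` from 0x10413a, C line 1063: 16 ≤ n < 512, the result is 5 + log2_4[n >> 5]
    refine ReachVia.done ?_
    v_returned
    obtain ⟨hx, hx31⟩ := Vorbis.Spec.ilog.toInt_of_msb _ hbr_104102
    rw [Vorbis.Spec.ilog.jle_iff _ _ hbr_104102 (by decide)] at hbr_104114
    rw [Vorbis.Spec.ilog.jg_iff _ _ hbr_104102 (by decide)] at hbr_10411c
    have hb := Vorbis.Spec.ilog.addr_range _ 5 hbr_104102 (by omega)
    refine ⟨by v_untouched, ?_, ?_⟩
    · -- n is not negative here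
      intro hneg
      exfalso
      omega
    · -- the value, when the table has its contents
      intro hT
      have hrd := Vorbis.Spec.ilog.table_read u.mem _ _ hb (by omega) hT
      rw [w_rax, hx, Vorbis.Spec.ilog.ilogVal_range5 _ (by omega) (by omega)]
      rw [Vorbis.Spec.ilog.read_through _ _ _ _ _ he_room (by omega), hrd]
      exact Vorbis.Spec.ilog.rax_val _ 5 (Vorbis.Spec.log2_4Table_le _) (by decide)
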